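-- pv_equiv track=rewrite | github.com/chenqimiao03/algorithm | problemset/LCP 74. 最强祝福力场.py | fieldOfGreatestBlessing
-- ===== SOURCE A (Python) =====
-- from typing import List
--
-- def fieldOfGreatestBlessing(forceField: List[List[int]]) -> int:
--     # 二维差分 + 离散化
--     # 排序 + 去重
--     def _sort(arr):
--         arr.sort()
--         size = 1
--         for i in range(1, len(arr)):
--             if arr[i] != arr[size - 1]:
--                 arr[size] = arr[i]
--                 size += 1
--         return size
--     # 二分查找
--     def rank(arr, v, size):
--         l, r = 0, size - 1
--         ret = 0
--         while l <= r:
--             m = (l + r) // 2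
--             if arr[m] >= v:
--                 ret = m
--                 r = m - 1
--             else:
--                 l = m + 1
--         return ret + 1
--
--     def add(arr, a, b, c, d, k=1):
--         arr[a][b] += k
--         arr[a][d + 1] -= k
--         arr[c + 1][b] -= k
--         arr[c + 1][d + 1] += k
--
--     n = len(forceField)
--     xs = [0 for i in range(n << 1)]
--     ys = [0 for i in range(n << 1)]
--     k, p = 0, 0
--     for i in range(n):
--         x, y, r = forceField[i][0], forceField[i][1], forceField[i][2]
--         xs[k] = (x << 1) - r
--         k += 1
--         xs[k] = (x << 1) + r
--         k += 1
--         ys[p] = (y << 1) - r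
--         p += 1
--         ys[p] = (y << 1) + r
--         p += 1
--     sizex = _sort(xs)
--     sizey = _sort(ys)
--     diff = [[0 for i in range(sizey + 2)] for j in range(sizex + 2)]
--     for i in range(n):
--         x, y, r = forceField[i][0], forceField[i][1], forceField[i][2]
--         # 也可以使用哈希表
--         a = rank(xs, (x << 1) - r, sizex)
--         b = rank(ys, (y << 1) - r, sizey)
--         c = rank(xs, (x << 1) + r, sizex)
--         d = rank(ys, (y << 1) + r, sizey)
--         add(diff, a, b, c, d)
--     ret = 0
--     for i in range(1, len(diff)):
--         for j in range(1, len(diff[0])):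
--             diff[i][j] += diff[i][j - 1] + diff[i - 1][j] - diff[i - 1][j - 1]
--             ret = max(ret, diff[i][j])
--     return ret
-- ===== SOURCE B (Python) =====
-- def fieldOfGreatestBlessing(forceField):
--     n = len(forceField)
--     if n == 0:
--         return 0
--     xs = sorted(set((row[0] << 1) + s * row[2] for row in forceField for s in (-1, 1)))
--     ys = sorted(set((row[1] << 1) + s * row[2] for row in forceField for s in (-1, 1)))
--     xi = {v: i + 1 for i, v in enumerate(xs)}
--     yi = {v: i + 1 for i, v in enumerate(ys)}
--     events = [[] for _ in range(len(xs) + 2)]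
--     for row in forceField:
--         a, c = xi[(row[0] << 1) - row[2]], xi[(row[0] << 1) + row[2]]
--         b, d = yi[(row[1] << 1) - row[2]], yi[(row[1] << 1) + row[2]]
--         events[a].append((b, d, 1))
--         events[c + 1].append((b, d, -1))
--     m = len(ys)
--     ydiff = [0] * (m + 2)
--     best = 0
--     for i in range(1, len(xs) + 2):
--         for b, d, k in events[i]:
--             ydiff[b] += k
--             ydiff[d + 1] -= k
--         cur = 0
--         for j in range(1, m + 2):
--             cur += ydiff[j]
--             if cur > best:
--                 best = cur
--     return best
-- ===== Notes on version B (the rewrite author's own statement) =====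
-- stated objective: faster
-- what changed: B keeps the same coordinate compression (via sorted(set(..)) and a rank dictionary instead of in-place sort-dedup plus per-query binary search) but replaces A's full 2D difference grid with double prefix summation by an x-band sweep that maintains a single 1D y-difference array, applying each square's +1/-1 y-interval when its band starts/ends and prefix-summing that array once per band.
import Mathlib
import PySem

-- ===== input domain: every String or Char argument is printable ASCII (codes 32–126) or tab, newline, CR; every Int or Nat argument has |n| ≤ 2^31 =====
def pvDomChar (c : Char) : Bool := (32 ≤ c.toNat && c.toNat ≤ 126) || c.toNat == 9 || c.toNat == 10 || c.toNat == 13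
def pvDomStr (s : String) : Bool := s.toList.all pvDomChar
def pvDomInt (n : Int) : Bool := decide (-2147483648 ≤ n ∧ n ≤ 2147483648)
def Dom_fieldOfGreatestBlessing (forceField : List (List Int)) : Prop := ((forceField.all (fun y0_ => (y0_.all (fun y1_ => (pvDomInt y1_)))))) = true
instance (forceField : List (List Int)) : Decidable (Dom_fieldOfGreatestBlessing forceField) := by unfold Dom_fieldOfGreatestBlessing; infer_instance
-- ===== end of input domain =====

-- B replaces A's 2D difference grid + double prefix sum by an x-band sweep that keeps one
-- 1D difference array over the compressed y-coordinates (different decomposition, O(n) extra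
-- space instead of O(n^2)); same return value; neither implementation mutates its argument.

-- ===== PORT A =====
def pvASortLoop (st : List Int × Nat) (i : Nat) : List Int × Nat :=
  if st.1.getD i 0 ≠ st.1.getD (st.2 - 1) 0 then
    (st.1.set st.2 (st.1.getD i 0), st.2 + 1)
  else st

def pvASort (arr : List Int) : List Int × Nat :=
  let arr := PySem.List.sorted arr (fun x => x) false
  (List.range' 1 (arr.length - 1)).foldl pvASortLoop (arr, 1)

def pvARankLoop (arr : List Int) (v : Int) : Nat → Int → Int → Int → Int
  | 0, _, _, ret => ret + 1
  | fuel+1, l, r, ret =>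
    if l ≤ r then
      let m := PySem.Int.floordiv (l + r) 2
      if arr.getD m.toNat 0 ≥ v then pvARankLoop arr v fuel l (m - 1) m
      else pvARankLoop arr v fuel (m + 1) r ret
    else ret + 1

def pvARank (arr : List Int) (v : Int) (size : Nat) : Int :=
  pvARankLoop arr v (size + 1) 0 ((size : Int) - 1) 0

def pvG2 (g : List (List Int)) (i j : Nat) : Int := (g.getD i []).getD j 0

def pvM2 (g : List (List Int)) (i j : Nat) (k : Int) : List (List Int) :=
  g.modify i (fun row => row.modify j (· + k))

def pvAAdd (g : List (List Int)) (a b c d : Nat) : List (List Int) :=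
  pvM2 (pvM2 (pvM2 (pvM2 g a b 1) a (d+1) (-1)) (c+1) b (-1)) (c+1) (d+1) 1

def pvABuild (st : List Int × Nat × List Int × Nat) (f : List Int) : List Int × Nat × List Int × Nat :=
  let x := f.getD 0 0; let y := f.getD 1 0; let r := f.getD 2 0
  let (xs, k, ys, p) := st
  let xs := xs.set k ((x <<< (1:Nat)) - r); let k := k + 1
  let xs := xs.set k ((x <<< (1:Nat)) + r); let k := k + 1
  let ys := ys.set p ((y <<< (1:Nat)) - r); let p := p + 1
  let ys := ys.set p ((y <<< (1:Nat)) + r); let p := p + 1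
  (xs, k, ys, p)

def pvADiffStep (xsArr : List Int) (sizex : Nat) (ysArr : List Int) (sizey : Nat)
    (g : List (List Int)) (f : List Int) : List (List Int) :=
  let x := f.getD 0 0; let y := f.getD 1 0; let r := f.getD 2 0
  let a := pvARank xsArr ((x <<< (1:Nat)) - r) sizex
  let b := pvARank ysArr ((y <<< (1:Nat)) - r) sizey
  let c := pvARank xsArr ((x <<< (1:Nat)) + r) sizex
  let d := pvARank ysArr ((y <<< (1:Nat)) + r) sizey
  pvAAdd g a.toNat b.toNat c.toNat d.toNat

def pvAPrefixCell (i : Nat) (st : List (List Int) × Int) (j : Nat) : List (List Int) × Int :=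
  let g := st.1
  let v := pvG2 g i j + (pvG2 g i (j-1) + pvG2 g (i-1) j - pvG2 g (i-1) (j-1))
  (pvM2 g i j (pvG2 g i (j-1) + pvG2 g (i-1) j - pvG2 g (i-1) (j-1)), max st.2 v)

def pvAPrefixRow (cols : Nat) (st : List (List Int) × Int) (i : Nat) : List (List Int) × Int :=
  (List.range' 1 cols).foldl (pvAPrefixCell i) st

def fieldOfGreatestBlessing (forceField : List (List Int)) : Int :=
  let n := forceField.length
  let st := forceField.foldl pvABuild (List.replicate (n <<< 1) 0, 0, List.replicate (n <<< 1) 0, 0)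
  let sx := pvASort st.1
  let sy := pvASort st.2.2.1
  let diff0 : List (List Int) := List.replicate (sx.2 + 2) (List.replicate (sy.2 + 2) 0)
  let diff := forceField.foldl (pvADiffStep sx.1 sx.2 sy.1 sy.2) diff0
  let res := (List.range' 1 (diff.length - 1)).foldl
    (pvAPrefixRow ((diff.getD 0 []).length - 1)) (diff, 0)
  res.2

-- ===== PORT B =====
def pvBVals (row : List Int) (c : Nat) : List Int :=
  ([-1, 1] : List Int).map (fun s => (row.getD c 0 <<< (1:Nat)) + s * row.getD 2 0)

def pvBDict (xs : List Int) : PySem.Dict Int Int :=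
  (PySem.List.enumerate xs 0).foldl (fun d p => d.insert p.2 (p.1 + 1)) PySem.Dict.empty

def pvBEvents (xi yi : PySem.Dict Int Int) (events : List (List (Int × Int × Int))) (row : List Int) :
    List (List (Int × Int × Int)) :=
  let a := xi.getD ((row.getD 0 0 <<< (1:Nat)) - row.getD 2 0) 0
  let c := xi.getD ((row.getD 0 0 <<< (1:Nat)) + row.getD 2 0) 0
  let b := yi.getD ((row.getD 1 0 <<< (1:Nat)) - row.getD 2 0) 0
  let d := yi.getD ((row.getD 1 0 <<< (1:Nat)) + row.getD 2 0) 0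
  let events := events.modify a.toNat (· ++ [(b, d, (1:Int))])
  events.modify (c + 1).toNat (· ++ [(b, d, (-1:Int))])

def pvBApply (yd : List Int) (e : Int × Int × Int) : List Int :=
  (yd.modify e.1.toNat (· + e.2.2)).modify (e.2.1 + 1).toNat (· + (- e.2.2))

def pvBScan (yd : List Int) (p : Int × Int) (j : Nat) : Int × Int :=
  let cur := p.1 + yd.getD j 0
  (cur, if cur > p.2 then cur else p.2)

def pvBBand (events : List (List (Int × Int × Int))) (m : Nat) (st : List Int × Int) (i : Nat) :
    List Int × Int :=
  let yd := (events.getD i []).foldl pvBApply st.1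
  let inner := (List.range' 1 (m + 1)).foldl (pvBScan yd) (0, st.2)
  (yd, inner.2)

def fieldOfGreatestBlessing_alt (forceField : List (List Int)) : Int :=
  let n := forceField.length
  if n = 0 then 0 else
  let xs := PySem.List.sorted (PySem.Set.ofList (forceField.flatMap (fun row => pvBVals row 0))) (fun x => x) false
  let ys := PySem.List.sorted (PySem.Set.ofList (forceField.flatMap (fun row => pvBVals row 1))) (fun x => x) false
  let xi := pvBDict xs
  let yi := pvBDict ys
  let events := forceField.foldl (pvBEvents xi yi) (List.replicate (xs.length + 2) [])
  let m := ys.length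
  let res := (List.range' 1 (xs.length + 1)).foldl (pvBBand events m) (List.replicate (m + 2) 0, 0)
  res.2

-- ===== PRECONDITION & SPEC =====
-- Pre_ excludes exactly the inputs where the Python A raises IndexError: a row with fewer
-- than three entries (A reads row[0], row[1], row[2]; B reads the same cells and needs them too).
def Pre_fieldOfGreatestBlessing (forceField : List (List Int)) : Prop :=
  ∀ row ∈ forceField, 3 ≤ row.length
instance (forceField : List (List Int)) : Decidable (Pre_fieldOfGreatestBlessing forceField) := by
  unfold Pre_fieldOfGreatestBlessing; infer_instance

def pvWitness_fieldOfGreatestBlessing : List (List Int) := [[0, 0, 2], [1, 1, 2]]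

def Spec_fieldOfGreatestBlessing (forceField : List (List Int)) (out : Int) : Prop := out = fieldOfGreatestBlessing_alt forceField
instance (forceField : List (List Int)) (out : Int) : Decidable (Spec_fieldOfGreatestBlessing forceField out) := by unfold Spec_fieldOfGreatestBlessing; infer_instance

-- ===== CLAIM (what is proved, stated in full; the proofs are below) =====
def Claim_equal_fieldOfGreatestBlessing : Prop := ∀ (forceField : List (List Int)), Dom_fieldOfGreatestBlessing forceField → Pre_fieldOfGreatestBlessing forceField → Spec_fieldOfGreatestBlessing forceField (fieldOfGreatestBlessing forceField)

-- ===== LEMMAS AND PROOFS =====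
-- ===== proof-side abstractions =====
def pvInd (b : Prop) [Decidable b] : Int := if b then 1 else 0

def pvXRaw (ff : List (List Int)) : List Int :=
  ff.flatMap (fun f => [2 * f.getD 0 0 - f.getD 2 0, 2 * f.getD 0 0 + f.getD 2 0])
def pvYRaw (ff : List (List Int)) : List Int :=
  ff.flatMap (fun f => [2 * f.getD 1 0 - f.getD 2 0, 2 * f.getD 1 0 + f.getD 2 0])

def pvDSAux (last : Int) : List Int → List Int
  | [] => []
  | y :: t => if y = last then pvDSAux last t else y :: pvDSAux y t

def pvDS : List Int → List Int
  | [] => []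
  | x :: t => x :: pvDSAux x t

def pvSrt (l : List Int) : List Int := PySem.List.sorted l (fun x => x) false

def pvX (ff : List (List Int)) : List Int := pvDS (pvSrt (pvXRaw ff))
def pvY (ff : List (List Int)) : List Int := pvDS (pvSrt (pvYRaw ff))

def pvIx (X : List Int) (v : Int) : Int := (List.idxOf v X : Int) + 1

def pvPt (X Y : List Int) (f : List Int) : Int × Int × Int × Int :=
  (pvIx X (2 * f.getD 0 0 - f.getD 2 0), pvIx Y (2 * f.getD 1 0 - f.getD 2 0),
   pvIx X (2 * f.getD 0 0 + f.getD 2 0), pvIx Y (2 * f.getD 1 0 + f.getD 2 0))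

def pvPts (ff : List (List Int)) : List (Int × Int × Int × Int) :=
  ff.map (pvPt (pvX ff) (pvY ff))

def pvDAt (p : Int × Int × Int × Int) (i j : Nat) : Int :=
  (pvInd (p.1 = (i:Int)) - pvInd (p.2.2.1 + 1 = (i:Int))) *
  (pvInd (p.2.1 = (j:Int)) - pvInd (p.2.2.2 + 1 = (j:Int)))
def pvYAt (p : Int × Int × Int × Int) (i j : Nat) : Int :=
  (pvInd (p.1 ≤ (i:Int)) - pvInd (p.2.2.1 + 1 ≤ (i:Int))) *
  (pvInd (p.2.1 = (j:Int)) - pvInd (p.2.2.2 + 1 = (j:Int)))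
def pvPAt (p : Int × Int × Int × Int) (i j : Nat) : Int :=
  (pvInd (p.1 ≤ (i:Int)) - pvInd (p.2.2.1 + 1 ≤ (i:Int))) *
  (pvInd (p.2.1 ≤ (j:Int)) - pvInd (p.2.2.2 + 1 ≤ (j:Int)))

def pvD (pts : List (Int × Int × Int × Int)) (i j : Nat) : Int := (pts.map (fun p => pvDAt p i j)).sum
def pvYS (pts : List (Int × Int × Int × Int)) (i j : Nat) : Int := (pts.map (fun p => pvYAt p i j)).sum
def pvPS (pts : List (Int × Int × Int × Int)) (i j : Nat) : Int := (pts.map (fun p => pvPAt p i j)).sum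

def pvBnd (SX SY : Nat) (p : Int × Int × Int × Int) : Prop :=
  1 ≤ p.1 ∧ p.1 ≤ (SX:Int) ∧ 1 ≤ p.2.1 ∧ p.2.1 ≤ (SY:Int) ∧
  1 ≤ p.2.2.1 ∧ p.2.2.1 ≤ (SX:Int) ∧ 1 ≤ p.2.2.2 ∧ p.2.2.2 ≤ (SY:Int)

def pvRet (pts : List (Int × Int × Int × Int)) (RI RJ : Nat) : Int :=
  (List.range' 1 RI).foldl
    (fun acc i => (List.range' 1 RJ).foldl (fun acc j => max acc (pvPS pts i j)) acc) 0

-- ===== pointwise identities =====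
theorem pvInd_step (a : Int) (i : Nat) (h : 1 ≤ i) :
    pvInd (a = (i:Int)) = pvInd (a ≤ (i:Int)) - pvInd (a ≤ ((i-1 : Nat):Int)) := by
  unfold pvInd
  have : ((i-1 : Nat):Int) = (i:Int) - 1 := by omega
  rw [this]; split_ifs <;> omega

theorem pvPAt_rec (p : Int × Int × Int × Int) (i j : Nat) (hi : 1 ≤ i) (hj : 1 ≤ j) :
    pvPAt p i j = pvDAt p i j + pvPAt p i (j-1) + pvPAt p (i-1) j - pvPAt p (i-1) (j-1) := by
  unfold pvPAt pvDAt
  rw [pvInd_step p.1 i hi, pvInd_step (p.2.2.1+1) i hi, pvInd_step p.2.1 j hj,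
      pvInd_step (p.2.2.2+1) j hj]
  ring

theorem pvPAt_col (p : Int × Int × Int × Int) (i j : Nat) (hj : 1 ≤ j) :
    pvPAt p i j = pvPAt p i (j-1) + pvYAt p i j := by
  unfold pvPAt pvYAt
  rw [pvInd_step p.2.1 j hj, pvInd_step (p.2.2.2+1) j hj]
  ring

theorem pvYAt_row (p : Int × Int × Int × Int) (i j : Nat) (hi : 1 ≤ i) :
    pvYAt p i j = pvYAt p (i-1) j + pvDAt p i j := by
  unfold pvYAt pvDAt
  rw [pvInd_step p.1 i hi, pvInd_step (p.2.2.1+1) i hi]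
  ring

theorem pvPS_rec (pts : List (Int × Int × Int × Int)) (i j : Nat) (hi : 1 ≤ i) (hj : 1 ≤ j) :
    pvPS pts i j = pvD pts i j + pvPS pts i (j-1) + pvPS pts (i-1) j - pvPS pts (i-1) (j-1) := by
  induction pts with
  | nil => simp [pvPS, pvD]
  | cons p t ih => simp only [pvPS, pvD, List.map_cons, List.sum_cons] at *
                   rw [pvPAt_rec p i j hi hj]; omega

theorem pvPS_col (pts : List (Int × Int × Int × Int)) (i j : Nat) (hj : 1 ≤ j) :
    pvPS pts i j = pvPS pts i (j-1) + pvYS pts i j := by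
  induction pts with
  | nil => simp [pvPS, pvYS]
  | cons p t ih => simp only [pvPS, pvYS, List.map_cons, List.sum_cons] at *
                   rw [pvPAt_col p i j hj]; omega

theorem pvYS_row (pts : List (Int × Int × Int × Int)) (i j : Nat) (hi : 1 ≤ i) :
    pvYS pts i j = pvYS pts (i-1) j + pvD pts i j := by
  induction pts with
  | nil => simp [pvYS, pvD]
  | cons p t ih => simp only [pvYS, pvD, List.map_cons, List.sum_cons] at *
                   rw [pvYAt_row p i j hi]; omega

theorem pvInd_false (b : Prop) [Decidable b] (h : ¬ b) : pvInd b = 0 := by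
  unfold pvInd; exact if_neg h

theorem pvPAt_row0 (p : Int × Int × Int × Int) (h1 : 1 ≤ p.1) (h5 : 1 ≤ p.2.2.1) (j : Nat) :
    pvPAt p 0 j = 0 := by
  unfold pvPAt
  rw [pvInd_false _ (by simp; omega), pvInd_false (p.2.2.1 + 1 ≤ ((0:Nat):Int)) (by simp; omega)]
  ring

theorem pvPAt_col0 (p : Int × Int × Int × Int) (h3 : 1 ≤ p.2.1) (h7 : 1 ≤ p.2.2.2) (i : Nat) :
    pvPAt p i 0 = 0 := by
  unfold pvPAt
  rw [pvInd_false (p.2.1 ≤ ((0:Nat):Int)) (by simp; omega),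
      pvInd_false (p.2.2.2 + 1 ≤ ((0:Nat):Int)) (by simp; omega)]
  ring

theorem pvYAt_row0 (p : Int × Int × Int × Int) (h1 : 1 ≤ p.1) (h5 : 1 ≤ p.2.2.1) (j : Nat) :
    pvYAt p 0 j = 0 := by
  unfold pvYAt
  rw [pvInd_false (p.1 ≤ ((0:Nat):Int)) (by simp; omega),
      pvInd_false (p.2.2.1 + 1 ≤ ((0:Nat):Int)) (by simp; omega)]
  ring

theorem pvDAt_row0 (p : Int × Int × Int × Int) (h1 : 1 ≤ p.1) (h5 : 1 ≤ p.2.2.1) (j : Nat) :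
    pvDAt p 0 j = 0 := by
  unfold pvDAt
  rw [pvInd_false (p.1 = ((0:Nat):Int)) (by simp; omega),
      pvInd_false (p.2.2.1 + 1 = ((0:Nat):Int)) (by simp; omega)]
  ring

theorem pvDAt_col0 (p : Int × Int × Int × Int) (h3 : 1 ≤ p.2.1) (h7 : 1 ≤ p.2.2.2) (i : Nat) :
    pvDAt p i 0 = 0 := by
  unfold pvDAt
  rw [pvInd_false (p.2.1 = ((0:Nat):Int)) (by simp; omega),
      pvInd_false (p.2.2.2 + 1 = ((0:Nat):Int)) (by simp; omega)]
  ring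

theorem pvSum_zero {pts : List (Int × Int × Int × Int)} (f : (Int × Int × Int × Int) → Int)
    (h : ∀ p ∈ pts, f p = 0) : (pts.map f).sum = 0 := by
  apply List.sum_eq_zero; intro x hx
  obtain ⟨p, hp, rfl⟩ := List.mem_map.mp hx
  exact h p hp

theorem pvPS_row0 (pts : List (Int × Int × Int × Int)) (SX SY : Nat)
    (hb : ∀ p ∈ pts, pvBnd SX SY p) (j : Nat) : pvPS pts 0 j = 0 :=
  pvSum_zero _ (fun p hp => pvPAt_row0 p (hb p hp).1 (hb p hp).2.2.2.2.1 j)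

theorem pvPS_col0 (pts : List (Int × Int × Int × Int)) (SX SY : Nat)
    (hb : ∀ p ∈ pts, pvBnd SX SY p) (i : Nat) : pvPS pts i 0 = 0 :=
  pvSum_zero _ (fun p hp => pvPAt_col0 p (hb p hp).2.2.1 (hb p hp).2.2.2.2.2.2.1 i)

theorem pvYS_row0 (pts : List (Int × Int × Int × Int)) (SX SY : Nat)
    (hb : ∀ p ∈ pts, pvBnd SX SY p) (j : Nat) : pvYS pts 0 j = 0 :=
  pvSum_zero _ (fun p hp => pvYAt_row0 p (hb p hp).1 (hb p hp).2.2.2.2.1 j)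

theorem pvD_row0 (pts : List (Int × Int × Int × Int)) (SX SY : Nat)
    (hb : ∀ p ∈ pts, pvBnd SX SY p) (j : Nat) : pvD pts 0 j = 0 :=
  pvSum_zero _ (fun p hp => pvDAt_row0 p (hb p hp).1 (hb p hp).2.2.2.2.1 j)

theorem pvD_col0 (pts : List (Int × Int × Int × Int)) (SX SY : Nat)
    (hb : ∀ p ∈ pts, pvBnd SX SY p) (i : Nat) : pvD pts i 0 = 0 :=
  pvSum_zero _ (fun p hp => pvDAt_col0 p (hb p hp).2.2.1 (hb p hp).2.2.2.2.2.2.1 i)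

-- generic getD-of-modify
theorem pvGetD_modify {α : Type} (l : List α) (i i' : Nat) (f : α → α) (d : α) :
    (l.modify i f).getD i' d = if i = i' ∧ i' < l.length then f (l.getD i' d) else l.getD i' d := by
  by_cases h : i' < l.length
  · rw [List.getD_eq_getElem _ _ (by simpa using h), List.getD_eq_getElem _ _ h,
        List.getElem_modify]
    split_ifs with h1 h2 h2 <;> simp_all
  · rw [List.getD_eq_default, List.getD_eq_default _ _ (by omega)]
    · simp [h]
    · simpa using (by omega : ¬ i' < l.length)
-- ===== pvDS (sorted dedup) properties =====
theorem pvDSAux_subset (last : Int) (t : List Int) : ∀ v ∈ pvDSAux last t, v ∈ t := by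
  induction t generalizing last with
  | nil => simp [pvDSAux]
  | cons y ys ih =>
    intro v hv
    by_cases h : y = last
    · simp only [pvDSAux, if_pos h] at hv
      exact List.mem_cons_of_mem _ (ih last v hv)
    · simp only [pvDSAux, if_neg h] at hv
      rcases List.mem_cons.mp hv with rfl | hv
      · simp
      · exact List.mem_cons_of_mem _ (ih y v hv)

theorem pvDSAux_mem (last : Int) (t : List Int) : ∀ v ∈ t, v ∈ last :: pvDSAux last t := by
  induction t generalizing last with
  | nil => simp
  | cons y ys ih =>
    intro v hv
    by_cases h : y = last
    · subst h
      simp only [pvDSAux]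
      rcases List.mem_cons.mp hv with rfl | hv
      · simp
      · exact ih y v hv
    · simp only [pvDSAux, if_neg h]
      rcases List.mem_cons.mp hv with rfl | hv
      · simp
      · rcases List.mem_cons.mp (ih y v hv) with rfl | hthis
        · simp
        · exact List.mem_cons_of_mem _ (List.mem_cons_of_mem _ hthis)

theorem pvDS_mem (l : List Int) (v : Int) : v ∈ pvDS l ↔ v ∈ l := by
  cases l with
  | nil => simp [pvDS]
  | cons x t =>
    simp only [pvDS]
    constructor
    · intro h
      rcases List.mem_cons.mp h with rfl | h
      · simp
      · exact List.mem_cons_of_mem _ (pvDSAux_subset x t v h)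
    · intro h
      rcases List.mem_cons.mp h with rfl | h
      · simp
      · exact pvDSAux_mem x t v h

theorem pvDSAux_sorted (last : Int) (t : List Int) (hs : List.Pairwise (· ≤ ·) t)
    (hlast : ∀ y ∈ t, last ≤ y) :
    List.Pairwise (· < ·) (pvDSAux last t) ∧ ∀ z ∈ pvDSAux last t, last < z := by
  induction t generalizing last with
  | nil => simp [pvDSAux]
  | cons y ys ih =>
    have hs' := List.pairwise_cons.mp hs
    simp only [pvDSAux]
    split_ifs with h
    · subst h
      exact ih y hs'.2 hs'.1
    · have hy : last < y := lt_of_le_of_ne (hlast y (by simp)) (fun e => h e.symm)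
      obtain ⟨hp, hgt⟩ := ih y hs'.2 hs'.1
      refine ⟨List.pairwise_cons.mpr ⟨hgt, hp⟩, ?_⟩
      intro z hz
      rcases List.mem_cons.mp hz with rfl | hz
      · exact hy
      · exact lt_trans hy (hgt z hz)

theorem pvDS_sorted (l : List Int) (hs : List.Pairwise (· ≤ ·) l) :
    List.Pairwise (· < ·) (pvDS l) := by
  cases l with
  | nil => simp [pvDS]
  | cons x t =>
    have hs' := List.pairwise_cons.mp hs
    obtain ⟨hp, hgt⟩ := pvDSAux_sorted x t hs'.2 hs'.1
    exact List.pairwise_cons.mpr ⟨hgt, hp⟩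

theorem pvGetLastD_cons (a d : Int) (l : List Int) : (a :: l).getLastD d = l.getLastD a := by
  cases l with
  | nil => rfl
  | cons b t =>
    have h : (b :: t).getLast?.isSome := by simp
    simp only [List.getLastD]
    obtain ⟨w, hw⟩ := Option.isSome_iff_exists.mp h
    simp

theorem pvDSAux_concat (last : Int) (ys : List Int) (x : Int) :
    pvDSAux last (ys ++ [x]) =
      pvDSAux last ys ++
        (if x = (pvDSAux last ys).getLastD last then [] else [x]) := by
  induction ys generalizing last with
  | nil => simp [pvDSAux]
  | cons y t ih =>
    by_cases h : y = last
    · simp only [List.cons_append, pvDSAux, if_pos h]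
      exact ih last
    · simp only [List.cons_append, pvDSAux, if_neg h]
      rw [ih y]
      rw [pvGetLastD_cons y last (pvDSAux y t)]

theorem pvDS_concat (l : List Int) (hl : l ≠ []) (x : Int) :
    pvDS (l ++ [x]) = pvDS l ++ (if x = (pvDS l).getLastD 0 then [] else [x]) := by
  cases l with
  | nil => simp at hl
  | cons h t =>
    simp only [List.cons_append, pvDS, List.getLastD_cons]
    rw [pvDSAux_concat]

theorem pvDS_ne_nil (l : List Int) (hl : l ≠ []) : pvDS l ≠ [] := by
  cases l with
  | nil => simp at hl
  | cons x t => simp [pvDS]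
-- ===== A's in-place dedup loop =====
theorem pvTake_set_succ (l : List Int) (i : Nat) (v : Int) (h : i < l.length) :
    (l.set i v).take (i+1) = l.take i ++ [v] := by
  apply List.ext_getElem
  · simp; omega
  · intro n h1 h2
    simp only [List.getElem_take, List.getElem_set, List.getElem_append]
    by_cases hn : n < i
    · rw [if_neg (by omega), dif_pos (by simp; omega)]
    · have hin : i = n := by simp at h1; omega
      subst hin
      rw [if_pos rfl, dif_neg (by simp)]
      simp

theorem pvTake_getD (l K : List Int) (s : Nat) (hs : l.take s = K) (m : Nat)
    (hm : m < K.length) : l.getD m 0 = K.getD m 0 := by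
  subst hs
  have hml : m < l.length := by
    have := List.length_take_le s l
    have h2 : (List.take s l).length = min s l.length := List.length_take
    omega
  rw [List.getD_eq_getElem _ _ hml, List.getD_eq_getElem _ _ hm, List.getElem_take]

theorem pvGetD_of_drop_eq (l l' : List Int) (k : Nat) (hd : l.drop k = l'.drop k)
    (hk : k < l.length) (hk' : k < l'.length) : l.getD k 0 = l'.getD k 0 := by
  rw [List.getD_eq_getElem _ _ hk, List.getD_eq_getElem _ _ hk']
  have h1 : l[k] = (l.drop k)[0]'(by simp; omega) := by simp
  have h2 : l'[k] = (l'.drop k)[0]'(by simp; omega) := by simp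
  rw [h1, h2]; congr 1

theorem pvGetD_last (K : List Int) (hK : K ≠ []) : K.getD (K.length - 1) 0 = K.getLastD 0 := by
  have hpos : 0 < K.length := List.length_pos_iff.mpr hK
  rw [List.getD_eq_getElem _ _ (by omega), List.getLastD_eq_getLast?,
      List.getLast?_eq_some_getLast hK]
  simp [List.getLast_eq_getElem]

theorem pvASortLoop_inv (srt : List Int) (hne : srt ≠ []) :
    ∀ t, t ≤ srt.length - 1 →
      (((List.range' 1 t).foldl pvASortLoop (srt, 1)).1.length = srt.length ∧
       ((List.range' 1 t).foldl pvASortLoop (srt, 1)).2 = (pvDS (srt.take (t+1))).length ∧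
       ((List.range' 1 t).foldl pvASortLoop (srt, 1)).1.take (((List.range' 1 t).foldl pvASortLoop (srt, 1)).2)
         = pvDS (srt.take (t+1)) ∧
       ((List.range' 1 t).foldl pvASortLoop (srt, 1)).2 ≤ t + 1 ∧
       ((List.range' 1 t).foldl pvASortLoop (srt, 1)).1.drop (t+1) = srt.drop (t+1)) := by
  intro t
  induction t with
  | zero =>
    intro _
    cases srt with
    | nil => simp at hne
    | cons h tl => simp [pvDS, pvDSAux]
  | succ t ih =>
    intro ht
    obtain ⟨hlen, hsz, htake, hle, hdrop⟩ := ih (by omega)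
    have hconcat : List.range' 1 (t+1) = List.range' 1 t ++ [1 + t] := by
      rw [List.range'_concat]; norm_num
    rw [hconcat, List.foldl_append]
    set st := (List.range' 1 t).foldl pvASortLoop (srt, 1) with hst
    obtain ⟨arr, s⟩ := st
    simp only at hlen hsz htake hle hdrop
    simp only [List.foldl_cons, List.foldl_nil]
    have hidx : 1 + t = t + 1 := by omega
    rw [hidx]
    have htlt : t + 1 < srt.length := by omega
    have hKne : pvDS (srt.take (t+1)) ≠ [] := by
      apply pvDS_ne_nil
      cases srt with
      | nil => simp at hne
      | cons h tl => simp
    have hKlen : 1 ≤ s := by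
      have := List.length_pos_iff.mpr hKne
      omega
    have hslt : s ≤ t + 1 := hle
    -- the element read at index t+1 is srt[t+1]
    have hread : arr.getD (t+1) 0 = srt.getD (t+1) 0 :=
      pvGetD_of_drop_eq _ _ _ hdrop (by omega) htlt
    -- the element read at index s-1 is the last kept
    have hlast : arr.getD (s-1) 0 = (pvDS (srt.take (t+1))).getLastD 0 := by
      have h1 : arr.getD (s-1) 0 = (pvDS (srt.take (t+1))).getD (s-1) 0 :=
        pvTake_getD arr _ s htake (s-1) (by omega)
      rw [h1, ← pvGetD_last _ hKne, hsz]
    have htakesucc : srt.take (t+2) = srt.take (t+1) ++ [srt.getD (t+1) 0] := by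
      rw [List.getD_eq_getElem _ _ htlt]
      rw [← List.take_concat_get' srt (t+1) htlt]
    have hDSsucc : pvDS (srt.take (t+2)) =
        pvDS (srt.take (t+1)) ++
          (if srt.getD (t+1) 0 = (pvDS (srt.take (t+1))).getLastD 0 then [] else [srt.getD (t+1) 0]) := by
      rw [htakesucc, pvDS_concat]
      cases srt with
      | nil => simp at hne
      | cons h tl => simp
    simp only [pvASortLoop, hread, hlast]
    by_cases hcase : srt.getD (t+1) 0 = (pvDS (srt.take (t+1))).getLastD 0
    · rw [if_neg (by simpa using hcase)]
      refine ⟨hlen, ?_, ?_, by omega, ?_⟩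
      · rw [hDSsucc, if_pos hcase]; simpa using hsz
      · rw [hDSsucc, if_pos hcase]
        simpa [hsz] using htake
      · rw [show t+1+1 = (t+1)+1 from rfl, ← List.drop_drop, hdrop, List.drop_drop]
    · rw [if_pos (by simpa using hcase)]
      have hsl : s < arr.length := by omega
      refine ⟨by simpa using hlen, ?_, ?_, by omega, ?_⟩
      · rw [hDSsucc, if_neg hcase]
        simp [hsz]
      · rw [hDSsucc, if_neg hcase]
        have := pvTake_set_succ arr s (srt.getD (t+1) 0) hsl
        simp only
        rw [this, htake]
      · simp only
        rw [List.drop_set_of_lt (by omega)]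
        rw [show t+1+1 = (t+1)+1 from rfl, ← List.drop_drop, hdrop, List.drop_drop]

theorem pvASort_spec (l : List Int) (hne : l ≠ []) :
    (pvASort l).2 = (pvDS (pvSrt l)).length ∧
    ∀ m, m < (pvASort l).2 → (pvASort l).1.getD m 0 = (pvDS (pvSrt l)).getD m 0 := by
  have hsne : pvSrt l ≠ [] := by
    unfold pvSrt
    intro h
    rw [PySem.List.sorted_eq_nil_iff] at h
    exact hne h
  have hlen : 1 ≤ (pvSrt l).length := List.length_pos_iff.mpr hsne
  obtain ⟨h1, h2, h3, h4, h5⟩ := pvASortLoop_inv (pvSrt l) hsne ((pvSrt l).length - 1) (le_refl _)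
  have htake : (pvSrt l).take ((pvSrt l).length - 1 + 1) = pvSrt l := by
    apply List.take_of_length_le; omega
  rw [htake] at h2 h3
  unfold pvASort
  simp only [pvSrt] at *
  constructor
  · exact h2
  · intro m hm
    exact pvTake_getD _ _ _ h3 m (by omega)
-- ===== binary search (rank) =====
theorem pvStrictMono_getD (X : List Int) (hX : List.Pairwise (· < ·) X) (i j : Nat)
    (hi : i < X.length) (hj : j < X.length) (hij : i < j) : X.getD i 0 < X.getD j 0 := by
  rw [List.getD_eq_getElem _ _ hi, List.getD_eq_getElem _ _ hj]
  exact List.pairwise_iff_getElem.mp hX i j hi hj hij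

theorem pvARankLoop_inv (arr X : List Int) (hX : List.Pairwise (· < ·) X)
    (hread : ∀ m, m < X.length → arr.getD m 0 = X.getD m 0)
    (t : Nat) (ht : t < X.length) :
    ∀ fuel (l r ret : Int), 0 ≤ l → l ≤ (t:Int) → r ≤ (X.length : Int) - 1 →
      (ret = (t:Int) ∨ (t:Int) ≤ r) → (r + 1 - l).toNat < fuel →
      pvARankLoop arr (X.getD t 0) fuel l r ret = (t:Int) + 1 := by
  intro fuel
  induction fuel with
  | zero => omega
  | succ fuel ih =>
    intro l r ret hl0 hlt hr hdisj hfuel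
    simp only [pvARankLoop]
    split_ifs with hlr hge
    · -- l ≤ r, arr[m] ≥ v : go left with ret := m
      set m := PySem.Int.floordiv (l + r) 2 with hm
      obtain ⟨hm1, hm2⟩ := PySem.Int.floordiv_two_mid_bounds hlr
      rw [← hm] at hm1 hm2
      have hmlen : m.toNat < X.length := by omega
      rw [hread m.toNat hmlen] at hge
      have htm : (t:Int) ≤ m := by
        by_contra hc
        push Not at hc
        have : X.getD m.toNat 0 < X.getD t 0 := pvStrictMono_getD X hX m.toNat t hmlen ht (by omega)
        omega
      exact ih l (m - 1) m hl0 hlt (by omega) (by omega) (by omega)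
    · -- l ≤ r, arr[m] < v : go right
      set m := PySem.Int.floordiv (l + r) 2 with hm
      obtain ⟨hm1, hm2⟩ := PySem.Int.floordiv_two_mid_bounds hlr
      rw [← hm] at hm1 hm2
      have hmlen : m.toNat < X.length := by omega
      rw [hread m.toNat hmlen] at hge
      have hmt : m < (t:Int) := by
        by_contra hc
        push Not at hc
        rcases eq_or_lt_of_le hc with he | hlt2
        · rw [show m.toNat = t by omega] at hge; omega
        · have : X.getD t 0 < X.getD m.toNat 0 := pvStrictMono_getD X hX t m.toNat ht hmlen (by omega)
          omega
      exact ih (m + 1) r ret (by omega) (by omega) hr (by omega) (by omega)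
    · -- l > r : exit
      have : ret = (t:Int) := by omega
      rw [this]

theorem pvARank_spec (arr X : List Int) (hX : List.Pairwise (· < ·) X)
    (hread : ∀ m, m < X.length → arr.getD m 0 = X.getD m 0)
    (v : Int) (hv : v ∈ X) : pvARank arr v X.length = pvIx X v := by
  have hlt : List.idxOf v X < X.length := List.idxOf_lt_length_of_mem hv
  have hgd : X.getD (List.idxOf v X) 0 = v := by
    rw [List.getD_eq_getElem _ _ hlt]
    exact List.getElem_idxOf hlt
  unfold pvARank pvIx
  have h := pvARankLoop_inv arr X hX hread (List.idxOf v X) hlt (X.length + 1) 0 ((X.length:Int) - 1) 0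
    (by omega) (by omega) (by omega) (by omega) (by omega)
  rw [hgd] at h
  exact h
-- ===== the build loop fills in the raw doubled coordinates =====
theorem pvShl1 (x : Int) : x <<< (1:Nat) = 2 * x := by rw [Int.shiftLeft_eq]; ring

theorem pvSet_mid (acc rest : List Int) (v w : Int) :
    (acc ++ v :: rest).set acc.length w = acc ++ w :: rest := by
  induction acc with
  | nil => rfl
  | cons a t ih => simp [ih]

theorem pvSet2 (acc rest : List Int) (v w a b : Int) :
    ((acc ++ v :: w :: rest).set acc.length a).set (acc.length + 1) b
      = acc ++ a :: b :: rest := by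
  rw [pvSet_mid]
  rw [show acc ++ a :: w :: rest = (acc ++ [a]) ++ w :: rest by simp]
  rw [show acc.length + 1 = (acc ++ [a]).length by simp]
  rw [pvSet_mid]
  simp

theorem pvABuild_inv (ff : List (List Int)) : ∀ (xsAcc ysAcc : List Int),
    List.foldl pvABuild
      (xsAcc ++ List.replicate (2 * ff.length) 0, xsAcc.length,
       ysAcc ++ List.replicate (2 * ff.length) 0, ysAcc.length) ff
    = (xsAcc ++ pvXRaw ff, xsAcc.length + 2 * ff.length,
       ysAcc ++ pvYRaw ff, ysAcc.length + 2 * ff.length) := by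
  induction ff with
  | nil => simp [pvXRaw, pvYRaw]
  | cons f t ih =>
    intro xsAcc ysAcc
    have hrep : List.replicate (2 * (f :: t).length) (0:Int)
        = 0 :: 0 :: List.replicate (2 * t.length) 0 := by
      rw [show 2 * (f :: t).length = (2 * t.length) + 1 + 1 by simp [List.length_cons]; ring]
      simp [List.replicate_succ]
    rw [hrep]
    simp only [List.foldl_cons, pvABuild, pvShl1]
    rw [pvSet2, pvSet2]
    have ih' := ih (xsAcc ++ [2 * f.getD 0 0 - f.getD 2 0, 2 * f.getD 0 0 + f.getD 2 0])
                   (ysAcc ++ [2 * f.getD 1 0 - f.getD 2 0, 2 * f.getD 1 0 + f.getD 2 0])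
    simp only [List.append_assoc, List.cons_append, List.nil_append, List.length_append,
      List.length_cons, List.length_nil] at ih' ⊢
    rw [show xsAcc.length + 2 = xsAcc.length + (0 + 1 + 1) by ring,
        show ysAcc.length + 2 = ysAcc.length + (0 + 1 + 1) by ring] at ih' ⊢
    rw [ih']
    simp only [pvXRaw, pvYRaw, List.flatMap_cons, List.cons_append, List.nil_append,
      Prod.mk.injEq]
    refine ⟨trivial, by simp; ring, trivial, by simp; ring⟩

theorem pvABuild_main (ff : List (List Int)) :
    List.foldl pvABuild (List.replicate (ff.length <<< 1) 0, 0,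
      List.replicate (ff.length <<< 1) 0, 0) ff
    = (pvXRaw ff, 2 * ff.length, pvYRaw ff, 2 * ff.length) := by
  have h : ff.length <<< 1 = 2 * ff.length := by
    rw [Nat.shiftLeft_eq]; ring
  have := pvABuild_inv ff [] []
  simpa [h] using this
-- ===== the compressed coordinate lists =====
theorem pvSrt_pairwise (l : List Int) : List.Pairwise (· ≤ ·) (pvSrt l) := by
  have := PySem.List.sorted_pairwise (xs := l) (key := fun x : Int => x)
  simpa [pvSrt] using this

theorem pvX_sorted (ff : List (List Int)) : List.Pairwise (· < ·) (pvX ff) := by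
  unfold pvX
  exact pvDS_sorted _ (pvSrt_pairwise (pvXRaw ff))

theorem pvY_sorted (ff : List (List Int)) : List.Pairwise (· < ·) (pvY ff) := by
  unfold pvY
  exact pvDS_sorted _ (pvSrt_pairwise (pvYRaw ff))

theorem pvX_mem (ff : List (List Int)) (v : Int) : v ∈ pvX ff ↔ v ∈ pvXRaw ff := by
  unfold pvX
  rw [pvDS_mem]
  unfold pvSrt
  exact PySem.List.mem_sorted _ _ _ _

theorem pvY_mem (ff : List (List Int)) (v : Int) : v ∈ pvY ff ↔ v ∈ pvYRaw ff := by
  unfold pvY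
  rw [pvDS_mem]
  unfold pvSrt
  exact PySem.List.mem_sorted _ _ _ _

theorem pvXRaw_mem (ff : List (List Int)) (f : List Int) (hf : f ∈ ff) :
    (2 * f.getD 0 0 - f.getD 2 0) ∈ pvXRaw ff ∧ (2 * f.getD 0 0 + f.getD 2 0) ∈ pvXRaw ff := by
  unfold pvXRaw
  constructor <;> (rw [List.mem_flatMap]; exact ⟨f, hf, by simp⟩)

theorem pvYRaw_mem (ff : List (List Int)) (f : List Int) (hf : f ∈ ff) :
    (2 * f.getD 1 0 - f.getD 2 0) ∈ pvYRaw ff ∧ (2 * f.getD 1 0 + f.getD 2 0) ∈ pvYRaw ff := by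
  unfold pvYRaw
  constructor <;> (rw [List.mem_flatMap]; exact ⟨f, hf, by simp⟩)

theorem pvIx_bounds (X : List Int) (v : Int) (hv : v ∈ X) :
    1 ≤ pvIx X v ∧ pvIx X v ≤ (X.length : Int) := by
  have := List.idxOf_lt_length_of_mem hv
  unfold pvIx
  omega

theorem pvPts_bnd (ff : List (List Int)) :
    ∀ p ∈ pvPts ff, pvBnd (pvX ff).length (pvY ff).length p := by
  intro p hp
  obtain ⟨f, hf, rfl⟩ := List.mem_map.mp hp
  obtain ⟨hx1, hx2⟩ := pvXRaw_mem ff f hf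
  obtain ⟨hy1, hy2⟩ := pvYRaw_mem ff f hf
  have b1 := pvIx_bounds _ _ ((pvX_mem ff _).mpr hx1)
  have b2 := pvIx_bounds _ _ ((pvX_mem ff _).mpr hx2)
  have b3 := pvIx_bounds _ _ ((pvY_mem ff _).mpr hy1)
  have b4 := pvIx_bounds _ _ ((pvY_mem ff _).mpr hy2)
  exact ⟨b1.1, b1.2, b3.1, b3.2, b2.1, b2.2, b4.1, b4.2⟩

theorem pvNodup_lt (l : List Int) (h : List.Pairwise (· < ·) l) : l.Nodup :=
  h.imp ne_of_lt

theorem pvX_nodup (ff : List (List Int)) : (pvX ff).Nodup :=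
  pvNodup_lt _ (pvX_sorted ff)

theorem pvY_nodup (ff : List (List Int)) : (pvY ff).Nodup :=
  pvNodup_lt _ (pvY_sorted ff)

-- ===== B's sorted(set(...)) equals pvDS ∘ sorted =====
theorem pvBVals_eq_x (row : List Int) :
    pvBVals row 0 = [2 * row.getD 0 0 - row.getD 2 0, 2 * row.getD 0 0 + row.getD 2 0] := by
  simp [pvBVals, pvShl1]
  omega

theorem pvBVals_eq_y (row : List Int) :
    pvBVals row 1 = [2 * row.getD 1 0 - row.getD 2 0, 2 * row.getD 1 0 + row.getD 2 0] := by
  simp [pvBVals, pvShl1]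
  omega

theorem pvBSorted_eq (l : List Int) :
    PySem.List.sorted (PySem.Set.ofList l) (fun x => x) false = pvDS (pvSrt l) := by
  apply PySem.List.sorted_eq_of_perm_of_pairwise_lt
  · rw [List.perm_ext_iff_of_nodup (pvNodup_lt _ (pvDS_sorted _ (pvSrt_pairwise l)))
      (PySem.Set.nodup_ofList l)]
    intro a
    rw [pvDS_mem, PySem.Set.mem_ofList]
    unfold pvSrt
    exact PySem.List.mem_sorted _ _ _ _
  · exact pvDS_sorted _ (pvSrt_pairwise l)

theorem pvBX_eq (ff : List (List Int)) :
    PySem.List.sorted (PySem.Set.ofList (ff.flatMap (fun row => pvBVals row 0))) (fun x => x) false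
      = pvX ff := by
  have h : ∀ ffl : List (List Int), ffl.flatMap (fun row => pvBVals row 0) = pvXRaw ffl := by
    intro ffl
    induction ffl with
    | nil => rfl
    | cons f t ih =>
      simp only [pvXRaw, List.flatMap_cons] at *
      rw [pvBVals_eq_x, ih]
  rw [h]
  exact pvBSorted_eq _

theorem pvBY_eq (ff : List (List Int)) :
    PySem.List.sorted (PySem.Set.ofList (ff.flatMap (fun row => pvBVals row 1))) (fun x => x) false
      = pvY ff := by
  have h : ∀ ffl : List (List Int), ffl.flatMap (fun row => pvBVals row 1) = pvYRaw ffl := by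
    intro ffl
    induction ffl with
    | nil => rfl
    | cons f t ih =>
      simp only [pvYRaw, List.flatMap_cons] at *
      rw [pvBVals_eq_y, ih]
  rw [h]
  exact pvBSorted_eq _

-- ===== the dictionary =====
theorem pvBDict_items (xs : List Int) (hnd : xs.Nodup) :
    (pvBDict xs).items = (PySem.List.enumerate xs 0).map (fun p => (p.2, p.1 + 1)) := by
  unfold pvBDict
  have h := PySem.Dict.items_foldl_insert_fresh (l := PySem.List.enumerate xs 0)
    (k := fun p => p.2) (v := fun p => p.1 + 1) (d := PySem.Dict.empty) ?_ ?_
  · simpa using h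
  · intro a _; simp [PySem.Dict.contains_empty]
  · rw [PySem.List.map_snd_enumerate]; exact hnd

theorem pvBDict_getD (xs : List Int) (hnd : xs.Nodup) (v : Int) (hv : v ∈ xs) :
    (pvBDict xs).getD v 0 = pvIx xs v := by
  have hlt := List.idxOf_lt_length_of_mem hv
  have hmem : ((v, ((List.idxOf v xs : Int) + 1)) : Int × Int) ∈ (pvBDict xs).items := by
    rw [pvBDict_items xs hnd]
    rw [List.mem_map]
    refine ⟨((List.idxOf v xs : Int), v), ?_, rfl⟩
    rw [PySem.List.mem_enumerate_iff]
    exact ⟨List.idxOf v xs, hlt, by simp [List.getElem_idxOf hlt]⟩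
  have hkeys : (pvBDict xs).keys.Nodup :=
    PySem.Dict.nodup_keys_foldl_insert_key _ _ _ _ PySem.Dict.nodup_keys_empty
  have := PySem.Dict.getD_of_mem_items (pvBDict xs) hmem hkeys 0
  simpa [pvIx] using this
-- ===== the 2D difference grid =====
def pvShape (SX SY : Nat) (g : List (List Int)) : Prop :=
  g.length = SX + 2 ∧ ∀ i, i < SX + 2 → (g.getD i []).length = SY + 2

def pvAddPts (g : List (List Int)) (pts : List (Int × Int × Int × Int)) : List (List Int) :=
  pts.foldl (fun g p => pvAAdd g p.1.toNat p.2.1.toNat p.2.2.1.toNat p.2.2.2.toNat) g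

theorem pvShape_M2 (SX SY : Nat) (g : List (List Int)) (h : pvShape SX SY g) (i j : Nat) (k : Int) :
    pvShape SX SY (pvM2 g i j k) := by
  obtain ⟨h1, h2⟩ := h
  constructor
  · simpa [pvM2] using h1
  · intro i' hi'
    unfold pvM2
    rw [pvGetD_modify]
    split_ifs with hc
    · rw [List.length_modify]; exact h2 i' hi'
    · exact h2 i' hi'

theorem pvG2_M2 (SX SY : Nat) (g : List (List Int)) (h : pvShape SX SY g)
    (i j : Nat) (hi : i < SX + 2) (_hj : j < SY + 2) (k : Int)
    (i' j' : Nat) (hi' : i' < SX + 2) (hj' : j' < SY + 2) :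
    pvG2 (pvM2 g i j k) i' j' = pvG2 g i' j' + if i = i' ∧ j = j' then k else 0 := by
  obtain ⟨h1, h2⟩ := h
  unfold pvG2 pvM2
  rw [pvGetD_modify]
  by_cases hii : i = i'
  · subst hii
    rw [if_pos ⟨rfl, by omega⟩]
    rw [pvGetD_modify]
    by_cases hjj : j = j'
    · subst hjj
      rw [if_pos ⟨rfl, by rw [h2 i hi]; omega⟩, if_pos ⟨rfl, rfl⟩]
    · rw [if_neg (by tauto), if_neg (by tauto)]
      omega
  · rw [if_neg (by tauto), if_neg (by tauto)]
    omega

theorem pvIndSplit (A B C D : Prop) [Decidable A] [Decidable B] [Decidable C] [Decidable D] :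
    (if A ∧ B then (1:Int) else 0) + (if A ∧ D then (-1:Int) else 0)
      + (if C ∧ B then (-1:Int) else 0) + (if C ∧ D then (1:Int) else 0)
      = (pvInd A - pvInd C) * (pvInd B - pvInd D) := by
  unfold pvInd
  by_cases hA : A <;> by_cases hB : B <;> by_cases hC : C <;> by_cases hD : D <;>
    simp [hA, hB, hC, hD]

theorem pvShape_AAdd (SX SY : Nat) (g : List (List Int)) (h : pvShape SX SY g) (a b c d : Nat) :
    pvShape SX SY (pvAAdd g a b c d) := by
  unfold pvAAdd
  exact pvShape_M2 _ _ _ (pvShape_M2 _ _ _ (pvShape_M2 _ _ _ (pvShape_M2 _ _ _ h _ _ _) _ _ _) _ _ _) _ _ _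

theorem pvG2_AAdd (SX SY : Nat) (g : List (List Int)) (h : pvShape SX SY g)
    (p : Int × Int × Int × Int) (hb : pvBnd SX SY p)
    (i' j' : Nat) (hi' : i' < SX + 2) (hj' : j' < SY + 2) :
    pvG2 (pvAAdd g p.1.toNat p.2.1.toNat p.2.2.1.toNat p.2.2.2.toNat) i' j'
      = pvG2 g i' j' + pvDAt p i' j' := by
  obtain ⟨b1, b2, b3, b4, b5, b6, b7, b8⟩ := hb
  have ha : p.1.toNat < SX + 2 := by omega
  have hbb : p.2.1.toNat < SY + 2 := by omega
  have hc : p.2.2.1.toNat + 1 < SX + 2 := by omega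
  have hd : p.2.2.2.toNat + 1 < SY + 2 := by omega
  have s1 := pvShape_M2 SX SY g h p.1.toNat p.2.1.toNat 1
  have s2 := pvShape_M2 SX SY _ s1 p.1.toNat (p.2.2.2.toNat+1) (-1)
  have s3 := pvShape_M2 SX SY _ s2 (p.2.2.1.toNat+1) p.2.1.toNat (-1)
  unfold pvAAdd
  rw [pvG2_M2 SX SY _ s3 _ _ hc hd 1 i' j' hi' hj',
      pvG2_M2 SX SY _ s2 _ _ hc hbb (-1) i' j' hi' hj',
      pvG2_M2 SX SY _ s1 _ _ ha hd (-1) i' j' hi' hj',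
      pvG2_M2 SX SY _ h _ _ ha hbb 1 i' j' hi' hj']
  have e1 : (p.1.toNat = i') ↔ (p.1 = (i':Int)) := by omega
  have e2 : (p.2.1.toNat = j') ↔ (p.2.1 = (j':Int)) := by omega
  have e3 : (p.2.2.1.toNat + 1 = i') ↔ (p.2.2.1 + 1 = (i':Int)) := by omega
  have e4 : (p.2.2.2.toNat + 1 = j') ↔ (p.2.2.2 + 1 = (j':Int)) := by omega
  simp only [e1, e2, e3, e4]
  have hsplit := pvIndSplit (p.1 = (i':Int)) (p.2.1 = (j':Int))
    (p.2.2.1 + 1 = (i':Int)) (p.2.2.2 + 1 = (j':Int))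
  unfold pvDAt
  linarith [hsplit]

theorem pvAddPts_spec (SX SY : Nat) (pts : List (Int × Int × Int × Int)) :
    ∀ (g : List (List Int)), pvShape SX SY g → (∀ p ∈ pts, pvBnd SX SY p) →
      pvShape SX SY (pvAddPts g pts) ∧
      ∀ i' j', i' < SX + 2 → j' < SY + 2 →
        pvG2 (pvAddPts g pts) i' j' = pvG2 g i' j' + pvD pts i' j' := by
  induction pts with
  | nil => intro g hg _; exact ⟨hg, by simp [pvAddPts, pvD]⟩
  | cons p t ih =>
    intro g hg hb
    have hbp := hb p (by simp)
    have hg' : pvShape SX SY (pvAAdd g p.1.toNat p.2.1.toNat p.2.2.1.toNat p.2.2.2.toNat) :=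
      pvShape_AAdd _ _ _ hg _ _ _ _
    obtain ⟨ih1, ih2⟩ := ih _ hg' (fun q hq => hb q (by simp [hq]))
    refine ⟨ih1, ?_⟩
    intro i' j' hi' hj'
    unfold pvAddPts at *
    simp only [List.foldl_cons]
    rw [ih2 i' j' hi' hj', pvG2_AAdd SX SY g hg p hbp i' j' hi' hj']
    simp only [pvD, List.map_cons, List.sum_cons]
    ring
-- ===== A's in-place prefix pass =====
theorem pvRow_inv (pts : List (Int × Int × Int × Int)) (SX SY : Nat)
    (hb : ∀ p ∈ pts, pvBnd SX SY p) (i : Nat) (hi1 : 1 ≤ i) (hi2 : i ≤ SX + 1) :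
    ∀ (u : Nat), u ≤ SY + 1 → ∀ (g : List (List Int)) (acc : Int),
      pvShape SX SY g →
      (∀ i' j', i' < SX + 2 → j' < SY + 2 →
        pvG2 g i' j' = if i' < i then pvPS pts i' j' else pvD pts i' j') →
      pvShape SX SY ((List.range' 1 u).foldl (pvAPrefixCell i) (g, acc)).1 ∧
      (∀ i' j', i' < SX + 2 → j' < SY + 2 →
        pvG2 ((List.range' 1 u).foldl (pvAPrefixCell i) (g, acc)).1 i' j'
          = if i' < i ∨ (i' = i ∧ 1 ≤ j' ∧ j' ≤ u) then pvPS pts i' j' else pvD pts i' j') ∧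
      ((List.range' 1 u).foldl (pvAPrefixCell i) (g, acc)).2
        = (List.range' 1 u).foldl (fun a j => max a (pvPS pts i j)) acc := by
  intro u
  induction u with
  | zero =>
    intro _ g acc hsh hval
    simp only [List.range'_zero, List.foldl_nil]
    refine ⟨hsh, ?_, trivial⟩
    intro i' j' hi' hj'
    rw [hval i' j' hi' hj']
    congr 1
    simp only [eq_iff_iff]
    omega
  | succ u ihu =>
    intro hu g acc hsh hval
    obtain ⟨sh, val, accv⟩ := ihu (by omega) g acc hsh hval
    have hconcat : List.range' 1 (u+1) = List.range' 1 u ++ [1 + u] := by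
      rw [List.range'_concat]; norm_num
    rw [hconcat, List.foldl_append, List.foldl_append]
    set st := (List.range' 1 u).foldl (pvAPrefixCell i) (g, acc) with hst
    simp only [List.foldl_cons, List.foldl_nil]
    rw [show 1 + u = u + 1 by omega]
    -- the reads
    have hiA : i < SX + 2 := by omega
    have hiB : i - 1 < SX + 2 := by omega
    have hjA : u + 1 < SY + 2 := by omega
    have hjB : u < SY + 2 := by omega
    have r1 : pvG2 st.1 i (u+1) = pvD pts i (u+1) := by
      rw [val i (u+1) hiA hjA]; rw [if_neg (by omega)]
    have r2 : pvG2 st.1 i u = pvPS pts i u := by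
      rw [val i u hiA hjB]
      rcases Nat.eq_zero_or_pos u with rfl | hu0
      · rw [if_neg (by omega), pvD_col0 pts SX SY hb, pvPS_col0 pts SX SY hb]
      · rw [if_pos (by omega)]
    have r3 : pvG2 st.1 (i-1) (u+1) = pvPS pts (i-1) (u+1) := by
      rw [val (i-1) (u+1) hiB hjA]
      rcases Nat.lt_or_ge (i-1) i with h | h
      · rw [if_pos (by omega)]
      · omega
    have r4 : pvG2 st.1 (i-1) u = pvPS pts (i-1) u := by
      rw [val (i-1) u hiB hjB, if_pos (by omega)]
    have hnew : pvG2 st.1 i (u+1) + (pvG2 st.1 i u + pvG2 st.1 (i-1) (u+1) - pvG2 st.1 (i-1) u)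
        = pvPS pts i (u+1) := by
      rw [r1, r2, r3, r4]
      have := pvPS_rec pts i (u+1) hi1 (by omega)
      simp only [Nat.add_sub_cancel] at this
      omega
    constructor
    · exact pvShape_M2 _ _ _ sh _ _ _
    constructor
    · intro i' j' hi' hj'
      unfold pvAPrefixCell
      simp only [Nat.add_sub_cancel]
      rw [pvG2_M2 SX SY st.1 sh i (u+1) hiA hjA _ i' j' hi' hj']
      by_cases hc : i = i' ∧ u + 1 = j'
      · obtain ⟨rfl, rfl⟩ := hc
        rw [if_pos ⟨rfl, rfl⟩, if_pos (by omega)]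
        exact hnew
      · rw [if_neg hc, val i' j' hi' hj', add_zero]
        have hiff : (i' < i ∨ (i' = i ∧ 1 ≤ j' ∧ j' ≤ u)) ↔ (i' < i ∨ (i' = i ∧ 1 ≤ j' ∧ j' ≤ u + 1)) := by
          omega
        rw [if_congr hiff rfl rfl]
    · unfold pvAPrefixCell
      simp only [Nat.add_sub_cancel]
      rw [accv, hnew]

theorem pvOuter_inv (pts : List (Int × Int × Int × Int)) (SX SY : Nat)
    (hb : ∀ p ∈ pts, pvBnd SX SY p) (g0 : List (List Int)) (hsh0 : pvShape SX SY g0)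
    (hval0 : ∀ i' j', i' < SX + 2 → j' < SY + 2 → pvG2 g0 i' j' = pvD pts i' j') :
    ∀ (t : Nat), t ≤ SX + 1 →
      pvShape SX SY ((List.range' 1 t).foldl (pvAPrefixRow (SY + 1)) (g0, 0)).1 ∧
      (∀ i' j', i' < SX + 2 → j' < SY + 2 →
        pvG2 ((List.range' 1 t).foldl (pvAPrefixRow (SY + 1)) (g0, 0)).1 i' j'
          = if i' ≤ t then pvPS pts i' j' else pvD pts i' j') ∧
      ((List.range' 1 t).foldl (pvAPrefixRow (SY + 1)) (g0, 0)).2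
        = (List.range' 1 t).foldl
            (fun a i => (List.range' 1 (SY + 1)).foldl (fun a j => max a (pvPS pts i j)) a) 0 := by
  intro t
  induction t with
  | zero =>
    intro _
    simp only [List.range'_zero, List.foldl_nil]
    refine ⟨hsh0, ?_, trivial⟩
    intro i' j' hi' hj'
    rw [hval0 i' j' hi' hj']
    rcases Nat.eq_zero_or_pos i' with rfl | hp
    · rw [if_pos (by omega), pvD_row0 pts SX SY hb, pvPS_row0 pts SX SY hb]
    · rw [if_neg (by omega)]
  | succ t iht =>
    intro ht
    obtain ⟨sh, val, accv⟩ := iht (by omega)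
    have hconcat : List.range' 1 (t+1) = List.range' 1 t ++ [1 + t] := by
      rw [List.range'_concat]; norm_num
    rw [hconcat, List.foldl_append, List.foldl_append]
    set st := (List.range' 1 t).foldl (pvAPrefixRow (SY + 1)) (g0, 0) with hst
    simp only [List.foldl_cons, List.foldl_nil]
    rw [show 1 + t = t + 1 by omega]
    have hval' : ∀ i' j', i' < SX + 2 → j' < SY + 2 →
        pvG2 st.1 i' j' = if i' < t + 1 then pvPS pts i' j' else pvD pts i' j' := by
      intro i' j' hi' hj'
      rw [val i' j' hi' hj']
      congr 1
      simp only [eq_iff_iff]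
      omega
    have hrow := pvRow_inv pts SX SY hb (t+1) (by omega) (by omega) (SY+1) (le_refl _)
      st.1 st.2 sh hval'
    unfold pvAPrefixRow
    obtain ⟨rsh, rval, raccv⟩ := hrow
    refine ⟨rsh, ?_, ?_⟩
    · intro i' j' hi' hj'
      rw [rval i' j' hi' hj']
      by_cases hc : i' = t + 1 ∧ j' = 0
      · obtain ⟨rfl, rfl⟩ := hc
        rw [if_neg (by omega), if_pos (by omega),
            pvD_col0 pts SX SY hb, pvPS_col0 pts SX SY hb]
      · congr 1
        simp only [eq_iff_iff]
        omega
    · rw [raccv, accv]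
-- ===== B's events table =====
def pvEvAdd (ev : List (List (Int × Int × Int))) (p : Int × Int × Int × Int) :
    List (List (Int × Int × Int)) :=
  (ev.modify p.1.toNat (· ++ [(p.2.1, p.2.2.2, (1:Int))])).modify
    (p.2.2.1 + 1).toNat (· ++ [(p.2.1, p.2.2.2, (-1:Int))])

def pvEvtList (pts : List (Int × Int × Int × Int)) (i : Nat) : List (Int × Int × Int) :=
  pts.flatMap (fun p =>
    (if p.1 = (i:Int) then [(p.2.1, p.2.2.2, (1:Int))] else []) ++
    (if p.2.2.1 + 1 = (i:Int) then [(p.2.1, p.2.2.2, (-1:Int))] else []))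

theorem pvEvAdd_fold (SX SY : Nat) (pts : List (Int × Int × Int × Int))
    (hb : ∀ p ∈ pts, pvBnd SX SY p) :
    ∀ (ev : List (List (Int × Int × Int))), ev.length = SX + 2 →
      (pts.foldl pvEvAdd ev).length = SX + 2 ∧
      ∀ i, i < SX + 2 → (pts.foldl pvEvAdd ev).getD i [] = ev.getD i [] ++ pvEvtList pts i := by
  induction pts with
  | nil => intro ev hl; exact ⟨hl, fun i _ => by simp [pvEvtList]⟩
  | cons p t ih =>
    intro ev hl
    have hbp := hb p (by simp)
    obtain ⟨b1, b2, b3, b4, b5, b6, b7, b8⟩ := hbp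
    have hl' : (pvEvAdd ev p).length = SX + 2 := by
      simp [pvEvAdd, hl]
    obtain ⟨ih1, ih2⟩ := ih (fun q hq => hb q (by simp [hq])) (pvEvAdd ev p) hl'
    refine ⟨by simpa using ih1, ?_⟩
    intro i hi
    simp only [List.foldl_cons]
    rw [ih2 i hi]
    have hstep : (pvEvAdd ev p).getD i []
        = ev.getD i [] ++ (if p.1 = (i:Int) then [(p.2.1, p.2.2.2, (1:Int))] else [])
            ++ (if p.2.2.1 + 1 = (i:Int) then [(p.2.1, p.2.2.2, (-1:Int))] else []) := by
      unfold pvEvAdd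
      rw [pvGetD_modify, pvGetD_modify]
      simp only [List.length_modify, hl]
      by_cases c1 : p.1.toNat = i <;> by_cases c2 : (p.2.2.1 + 1).toNat = i
      · rw [if_pos ⟨c2, by omega⟩, if_pos ⟨c1, by omega⟩,
            if_pos (by omega), if_pos (by omega)]
        try simp
      · rw [if_neg (by tauto), if_pos ⟨c1, by omega⟩,
            if_pos (by omega), if_neg (by omega)]
        try simp
      · rw [if_pos ⟨c2, by omega⟩, if_neg (by tauto),
            if_neg (by omega), if_pos (by omega)]
        try simp
      · rw [if_neg (by tauto), if_neg (by tauto),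
            if_neg (by omega), if_neg (by omega)]
        try simp
    rw [hstep]
    simp [pvEvtList, List.flatMap_cons]

-- ===== applying one band of events to the 1D array =====
theorem pvBApply_fold (SY : Nat) (evs : List (Int × Int × Int))
    (hbe : ∀ e ∈ evs, 1 ≤ e.1 ∧ e.1 ≤ (SY:Int) ∧ 1 ≤ e.2.1 ∧ e.2.1 ≤ (SY:Int)) :
    ∀ (yd : List Int), yd.length = SY + 2 →
      (evs.foldl pvBApply yd).length = SY + 2 ∧
      ∀ j, j < SY + 2 → (evs.foldl pvBApply yd).getD j 0
        = yd.getD j 0 + (evs.map (fun e => e.2.2 * (pvInd (e.1 = (j:Int)) - pvInd (e.2.1 + 1 = (j:Int))))).sum := by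
  induction evs with
  | nil => intro yd hl; exact ⟨hl, fun j _ => by simp⟩
  | cons e t ih =>
    intro yd hl
    obtain ⟨b1, b2, b3, b4⟩ := hbe e (by simp)
    have hl' : (pvBApply yd e).length = SY + 2 := by simp [pvBApply, hl]
    obtain ⟨ih1, ih2⟩ := ih (fun q hq => hbe q (by simp [hq])) (pvBApply yd e) hl'
    refine ⟨by simpa using ih1, ?_⟩
    intro j hj
    simp only [List.foldl_cons]
    rw [ih2 j hj]
    have hstep : (pvBApply yd e).getD j 0
        = yd.getD j 0 + e.2.2 * (pvInd (e.1 = (j:Int)) - pvInd (e.2.1 + 1 = (j:Int))) := by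
      unfold pvBApply
      rw [pvGetD_modify, pvGetD_modify]
      simp only [List.length_modify, hl]
      unfold pvInd
      by_cases c1 : e.1.toNat = j <;> by_cases c2 : (e.2.1 + 1).toNat = j
      · rw [if_pos ⟨c2, by omega⟩, if_pos ⟨c1, by omega⟩, if_pos (by omega), if_pos (by omega)]
        ring
      · rw [if_neg (by tauto), if_pos ⟨c1, by omega⟩, if_pos (by omega), if_neg (by omega)]
        ring
      · rw [if_pos ⟨c2, by omega⟩, if_neg (by tauto), if_neg (by omega), if_pos (by omega)]
        ring
      · rw [if_neg (by tauto), if_neg (by tauto), if_neg (by omega), if_neg (by omega)]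
        ring
    rw [hstep]
    simp only [List.map_cons, List.sum_cons]
    ring

theorem pvEvtList_bnd (SX SY : Nat) (pts : List (Int × Int × Int × Int))
    (hb : ∀ p ∈ pts, pvBnd SX SY p) (i : Nat) :
    ∀ e ∈ pvEvtList pts i, 1 ≤ e.1 ∧ e.1 ≤ (SY:Int) ∧ 1 ≤ e.2.1 ∧ e.2.1 ≤ (SY:Int) := by
  intro e he
  rw [pvEvtList, List.mem_flatMap] at he
  obtain ⟨p, hp, hin⟩ := he
  obtain ⟨b1, b2, b3, b4, b5, b6, b7, b8⟩ := hb p hp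
  rw [List.mem_append] at hin
  rcases hin with h | h <;>
    (split_ifs at h <;> simp at h) <;> (subst h; exact ⟨b3, b4, b7, b8⟩)

theorem pvEvtSum (pts : List (Int × Int × Int × Int)) (i j : Nat) :
    ((pvEvtList pts i).map
        (fun e => e.2.2 * (pvInd (e.1 = (j:Int)) - pvInd (e.2.1 + 1 = (j:Int))))).sum
      = pvD pts i j := by
  induction pts with
  | nil => simp [pvEvtList, pvD]
  | cons p t ih =>
    simp only [pvEvtList, List.flatMap_cons, List.map_append, List.sum_append] at *
    rw [ih]
    simp only [pvD, List.map_cons, List.sum_cons]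
    have hsingle : (List.map (fun e => e.2.2 * (pvInd (e.1 = (j:Int)) - pvInd (e.2.1 + 1 = (j:Int))))
          (if p.1 = (i:Int) then [(p.2.1, p.2.2.2, (1:Int))] else [])).sum +
        (List.map (fun e => e.2.2 * (pvInd (e.1 = (j:Int)) - pvInd (e.2.1 + 1 = (j:Int))))
          (if p.2.2.1 + 1 = (i:Int) then [(p.2.1, p.2.2.2, (-1:Int))] else [])).sum
        = pvDAt p i j := by
      unfold pvDAt pvInd
      by_cases c1 : p.1 = (i:Int) <;> by_cases c2 : p.2.2.1 + 1 = (i:Int) <;>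
        simp [c1, c2]
    linarith [hsingle]

theorem pvMaxIf (a b : Int) : (if b < a then a else b) = max b a := by
  rcases lt_or_ge b a with h | h
  · rw [if_pos h]; exact (max_eq_right h.le).symm
  · rw [if_neg (by omega)]; exact (max_eq_left h).symm

theorem pvBScan_inv (pts : List (Int × Int × Int × Int)) (SX SY : Nat)
    (hb : ∀ p ∈ pts, pvBnd SX SY p) (i : Nat) (yd : List Int)
    (hyd : ∀ j, j < SY + 2 → yd.getD j 0 = pvYS pts i j) :
    ∀ u, u ≤ SY + 1 → ∀ (best : Int),
      (List.range' 1 u).foldl (pvBScan yd) (0, best)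
        = (pvPS pts i u, (List.range' 1 u).foldl (fun a j => max a (pvPS pts i j)) best) := by
  intro u
  induction u with
  | zero =>
    intro _ best
    simp only [List.range'_zero, List.foldl_nil]
    rw [pvPS_col0 pts SX SY hb]
  | succ u ihu =>
    intro hu best
    have hconcat : List.range' 1 (u+1) = List.range' 1 u ++ [1 + u] := by
      rw [List.range'_concat]; norm_num
    rw [hconcat, List.foldl_append, List.foldl_append, ihu (by omega) best]
    simp only [List.foldl_cons, List.foldl_nil]
    rw [show 1 + u = u + 1 by omega]
    unfold pvBScan
    simp only
    rw [hyd (u+1) (by omega)]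
    have hcol := pvPS_col pts i (u+1) (by omega)
    simp only [Nat.add_sub_cancel] at hcol
    rw [show pvPS pts i u + pvYS pts i (u+1) = pvPS pts i (u+1) from hcol.symm]
    rw [pvMaxIf]

theorem pvBBand_inv (pts : List (Int × Int × Int × Int)) (SX SY : Nat)
    (hb : ∀ p ∈ pts, pvBnd SX SY p) (events : List (List (Int × Int × Int)))
    (hev : ∀ i, i < SX + 2 → events.getD i [] = pvEvtList pts i) :
    ∀ t, t ≤ SX + 1 →
      ((List.range' 1 t).foldl (pvBBand events SY) (List.replicate (SY+2) 0, 0)).1.length = SY + 2 ∧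
      (∀ j, j < SY + 2 →
        ((List.range' 1 t).foldl (pvBBand events SY) (List.replicate (SY+2) 0, 0)).1.getD j 0
          = pvYS pts t j) ∧
      ((List.range' 1 t).foldl (pvBBand events SY) (List.replicate (SY+2) 0, 0)).2
        = (List.range' 1 t).foldl
            (fun a i => (List.range' 1 (SY + 1)).foldl (fun a j => max a (pvPS pts i j)) a) 0 := by
  intro t
  induction t with
  | zero =>
    intro _
    simp only [List.range'_zero, List.foldl_nil]
    refine ⟨by simp, ?_, trivial⟩
    intro j hj
    rw [pvYS_row0 pts SX SY hb]
    simp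
  | succ t iht =>
    intro ht
    obtain ⟨ihl, ihv, ihacc⟩ := iht (by omega)
    have hconcat : List.range' 1 (t+1) = List.range' 1 t ++ [1 + t] := by
      rw [List.range'_concat]; norm_num
    rw [hconcat, List.foldl_append, List.foldl_append]
    set st := (List.range' 1 t).foldl (pvBBand events SY) (List.replicate (SY+2) 0, 0) with hst
    simp only [List.foldl_cons, List.foldl_nil]
    rw [show 1 + t = t + 1 by omega]
    unfold pvBBand
    simp only
    rw [hev (t+1) (by omega)]
    obtain ⟨al, av⟩ := pvBApply_fold SY (pvEvtList pts (t+1))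
      (pvEvtList_bnd SX SY pts hb (t+1)) st.1 ihl
    have hyd' : ∀ j, j < SY + 2 →
        ((pvEvtList pts (t+1)).foldl pvBApply st.1).getD j 0 = pvYS pts (t+1) j := by
      intro j hj
      rw [av j hj, ihv j hj, pvEvtSum pts (t+1) j]
      have hrow := pvYS_row pts (t+1) j (by omega)
      simp only [Nat.add_sub_cancel] at hrow
      omega
    refine ⟨al, hyd', ?_⟩
    rw [pvBScan_inv pts SX SY hb (t+1) _ hyd' (SY+1) (le_refl _) st.2]
    simp only
    rw [ihacc]
-- ===== assembly =====
theorem pvRepGetD_nil (n i : Nat) : (List.replicate n ([]:List (Int×Int×Int))).getD i [] = [] := by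
  rcases Nat.lt_or_ge i n with h | h
  · simp [h]
  · simp [h]

theorem pvXRaw_ne (ff : List (List Int)) (hne : ff ≠ []) : pvXRaw ff ≠ [] := by
  cases ff with
  | nil => simp at hne
  | cons f t => simp [pvXRaw]

theorem pvYRaw_ne (ff : List (List Int)) (hne : ff ≠ []) : pvYRaw ff ≠ [] := by
  cases ff with
  | nil => simp at hne
  | cons f t => simp [pvYRaw]

theorem pvDiff0_shape (SX SY : Nat) :
    pvShape SX SY (List.replicate (SX + 2) (List.replicate (SY + 2) (0:Int))) := by
  constructor
  · simp
  · intro i hi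
    rw [List.getD_replicate _ hi]
    simp

theorem pvDiff0_zero (SX SY : Nat) (i j : Nat) :
    pvG2 (List.replicate (SX + 2) (List.replicate (SY + 2) (0:Int))) i j = 0 := by
  unfold pvG2
  rcases Nat.lt_or_ge i (SX+2) with h | h
  · rw [List.getD_replicate _ h]
    rcases Nat.lt_or_ge j (SY+2) with h2 | h2
    · rw [List.getD_replicate _ h2]
    · rw [List.getD_eq_default _ _ (by simpa using h2)]
  · have houter : (List.replicate (SX + 2) (List.replicate (SY + 2) (0:Int))).getD i [] = [] :=
      List.getD_eq_default _ _ (by simpa using h)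
    rw [houter]
    simp

theorem pvA_main (ff : List (List Int)) (hne : ff ≠ []) :
    fieldOfGreatestBlessing ff
      = pvRet (pvPts ff) ((pvX ff).length + 1) ((pvY ff).length + 1) := by
  have hXne := pvXRaw_ne ff hne
  have hYne := pvYRaw_ne ff hne
  obtain ⟨hszx, hreadx⟩ := pvASort_spec (pvXRaw ff) hXne
  obtain ⟨hszy, hready⟩ := pvASort_spec (pvYRaw ff) hYne
  have hXdef : pvDS (pvSrt (pvXRaw ff)) = pvX ff := rfl
  have hYdef : pvDS (pvSrt (pvYRaw ff)) = pvY ff := rfl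
  rw [hXdef] at hszx hreadx
  rw [hYdef] at hszy hready
  rw [hszx] at hreadx
  rw [hszy] at hready
  have hb := pvPts_bnd ff
  have hstep : ∀ (g : List (List Int)), ∀ f ∈ ff,
      pvADiffStep (pvASort (pvXRaw ff)).1 ((pvX ff).length)
        (pvASort (pvYRaw ff)).1 ((pvY ff).length) g f
        = (fun g p => pvAAdd g p.1.toNat p.2.1.toNat p.2.2.1.toNat p.2.2.2.toNat) g
            (pvPt (pvX ff) (pvY ff) f) := by
    intro g f hf
    obtain ⟨hx1, hx2⟩ := pvXRaw_mem ff f hf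
    obtain ⟨hy1, hy2⟩ := pvYRaw_mem ff f hf
    unfold pvADiffStep pvPt
    simp only [pvShl1]
    rw [pvARank_spec _ _ (pvX_sorted ff) hreadx _ ((pvX_mem ff _).mpr hx1),
        pvARank_spec _ _ (pvY_sorted ff) hready _ ((pvY_mem ff _).mpr hy1),
        pvARank_spec _ _ (pvX_sorted ff) hreadx _ ((pvX_mem ff _).mpr hx2),
        pvARank_spec _ _ (pvY_sorted ff) hready _ ((pvY_mem ff _).mpr hy2)]
  simp only [fieldOfGreatestBlessing, pvABuild_main]
  rw [hszx, hszy]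
  rw [PySem.List.foldl_congr_mem ff _ _ _ hstep]
  rw [← List.foldl_map (f := pvPt (pvX ff) (pvY ff))
        (g := fun g p => pvAAdd g p.1.toNat p.2.1.toNat p.2.2.1.toNat p.2.2.2.toNat)]
  rw [show List.map (pvPt (pvX ff) (pvY ff)) ff = pvPts ff from rfl]
  have hAdd := pvAddPts_spec ((pvX ff).length) ((pvY ff).length) (pvPts ff)
    (List.replicate ((pvX ff).length + 2) (List.replicate ((pvY ff).length + 2) 0))
    (pvDiff0_shape _ _) hb
  obtain ⟨shA, valA⟩ := hAdd
  have hval0 : ∀ i' j', i' < (pvX ff).length + 2 → j' < (pvY ff).length + 2 →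
      pvG2 (pvAddPts (List.replicate ((pvX ff).length + 2)
          (List.replicate ((pvY ff).length + 2) 0)) (pvPts ff)) i' j'
        = pvD (pvPts ff) i' j' := by
    intro i' j' hi' hj'
    rw [valA i' j' hi' hj', pvDiff0_zero]
    ring
  have hfoldid : List.foldl (fun g p => pvAAdd g p.1.toNat p.2.1.toNat p.2.2.1.toNat p.2.2.2.toNat)
      (List.replicate ((pvX ff).length + 2) (List.replicate ((pvY ff).length + 2) 0)) (pvPts ff)
      = pvAddPts (List.replicate ((pvX ff).length + 2)
          (List.replicate ((pvY ff).length + 2) 0)) (pvPts ff) := rfl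
  rw [hfoldid, shA.1, shA.2 0 (by omega)]
  rw [show (pvX ff).length + 2 - 1 = (pvX ff).length + 1 by omega,
      show (pvY ff).length + 2 - 1 = (pvY ff).length + 1 by omega]
  obtain ⟨_, _, hres⟩ := pvOuter_inv (pvPts ff) ((pvX ff).length) ((pvY ff).length) hb
    _ shA hval0 ((pvX ff).length + 1) (le_refl _)
  rw [hres]
  rfl

theorem pvB_main (ff : List (List Int)) (hne : ff ≠ []) :
    fieldOfGreatestBlessing_alt ff
      = pvRet (pvPts ff) ((pvX ff).length + 1) ((pvY ff).length + 1) := by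
  have hn0 : ¬ ff.length = 0 := by
    cases ff with
    | nil => simp at hne
    | cons f t => simp
  have hb := pvPts_bnd ff
  have hstep : ∀ (ev : List (List (Int × Int × Int))), ∀ row ∈ ff,
      pvBEvents (pvBDict (pvX ff)) (pvBDict (pvY ff)) ev row
        = pvEvAdd ev (pvPt (pvX ff) (pvY ff) row) := by
    intro ev row hf
    obtain ⟨hx1, hx2⟩ := pvXRaw_mem ff row hf
    obtain ⟨hy1, hy2⟩ := pvYRaw_mem ff row hf
    unfold pvBEvents pvEvAdd pvPt
    simp only [pvShl1]
    rw [pvBDict_getD _ (pvX_nodup ff) _ ((pvX_mem ff _).mpr hx1),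
        pvBDict_getD _ (pvY_nodup ff) _ ((pvY_mem ff _).mpr hy1),
        pvBDict_getD _ (pvX_nodup ff) _ ((pvX_mem ff _).mpr hx2),
        pvBDict_getD _ (pvY_nodup ff) _ ((pvY_mem ff _).mpr hy2)]
  simp only [fieldOfGreatestBlessing_alt]
  rw [if_neg hn0]
  rw [pvBX_eq, pvBY_eq]
  rw [PySem.List.foldl_congr_mem ff _ _ _ hstep]
  rw [← List.foldl_map (f := pvPt (pvX ff) (pvY ff)) (g := pvEvAdd)]
  rw [show List.map (pvPt (pvX ff) (pvY ff)) ff = pvPts ff from rfl]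
  obtain ⟨hevlen, hevget⟩ := pvEvAdd_fold ((pvX ff).length) ((pvY ff).length) (pvPts ff) hb
    (List.replicate ((pvX ff).length + 2) []) (by simp)
  have hev : ∀ i, i < (pvX ff).length + 2 →
      ((pvPts ff).foldl pvEvAdd (List.replicate ((pvX ff).length + 2) [])).getD i []
        = pvEvtList (pvPts ff) i := by
    intro i hi
    rw [hevget i hi, pvRepGetD_nil]
    simp
  obtain ⟨_, _, hres⟩ := pvBBand_inv (pvPts ff) ((pvX ff).length) ((pvY ff).length) hb
    _ hev ((pvX ff).length + 1) (le_refl _)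
  rw [hres]
  rfl

theorem pvMain_eq (ff : List (List Int)) :
    fieldOfGreatestBlessing ff = fieldOfGreatestBlessing_alt ff := by
  cases ff with
  | nil => decide
  | cons f t =>
    rw [pvA_main (f :: t) (by simp), pvB_main (f :: t) (by simp)]

-- ===== VERDICT (by name: the statement is the Claim_ definition above) =====
theorem fieldOfGreatestBlessing_spec : Claim_equal_fieldOfGreatestBlessing := by
  intro ff _ _
  unfold Spec_fieldOfGreatestBlessing
  exact pvMain_eq ff
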